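-- pv_equiv track=rewrite | github.com/DIG-Network/proof_research | sub-problems/verifier-oracle-model/experiments/adaptive-coordinate-or-pair-nor-or-partition-equivalence/script.py | build_or_partition_masks
-- ===== SOURCE A (Python) =====
-- N = 10
--
-- def build_or_partition_masks(masks: list[int]) -> list[tuple[int, int]]:
--     """(x_i OR x_j = 0, = 1) over domain indices."""
--     out: list[tuple[int, int]] = []
--     for i in range(N):
--         for j in range(i + 1, N):
--             b0 = 0
--             b1 = 0
--             for k, m in enumerate(masks):
--                 if (((m >> i) & 1) | ((m >> j) & 1)) & 1:
--                     b1 |= 1 << k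
--                 else:
--                     b0 |= 1 << k
--             out.append((b0, b1))
--     return out
-- ===== SOURCE B (Python) =====
-- N = 10
--
-- def _col(masks, i):
--     """Bitmask over domain indices k of bit i of masks[k]."""
--     c = 0
--     for k, m in enumerate(masks):
--         c |= ((m >> i) & 1) << k
--     return c
--
-- def build_or_partition_masks(masks):
--     """(x_i OR x_j = 0, = 1) over domain indices."""
--     full = (1 << len(masks)) - 1
--     cols = [_col(masks, i) for i in range(N)]
--     out = []
--     for i in range(N):
--         for j in range(i + 1, N):
--             b1 = cols[i] | cols[j]
--             out.append((full ^ b1, b1))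
--     return out
-- ===== Notes on version B (the rewrite author's own statement) =====
-- stated objective: faster
-- what changed: Instead of scanning all masks for each of the 45 (i,j) pairs, B builds one column bitmask per bit position i in a single family of passes and then computes each pair as b1 = col[i]|col[j], b0 = full^b1 in O(1) bit operations.
import Mathlib
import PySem

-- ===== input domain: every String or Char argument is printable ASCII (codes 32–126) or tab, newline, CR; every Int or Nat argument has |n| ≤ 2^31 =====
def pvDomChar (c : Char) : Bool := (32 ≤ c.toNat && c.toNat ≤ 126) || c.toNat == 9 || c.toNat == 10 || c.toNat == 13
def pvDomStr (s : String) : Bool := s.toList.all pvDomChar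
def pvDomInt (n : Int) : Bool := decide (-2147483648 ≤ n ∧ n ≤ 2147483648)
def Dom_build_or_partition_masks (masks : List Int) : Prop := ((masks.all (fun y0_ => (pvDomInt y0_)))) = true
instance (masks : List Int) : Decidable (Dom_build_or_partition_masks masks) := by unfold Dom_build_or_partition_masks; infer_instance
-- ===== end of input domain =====

-- B replaces A's O(N^2·M) per-pair scans of `masks` by N per-bit column bitmasks built
-- first, so each of the 45 pairs costs O(1) bit operations (objective: faster, constant factor).

-- ===== PORT A =====
-- inner `for k, m in enumerate(masks)` loop of A, for one pair (i, j)
def pvInnerA (masks : List Int) (i j : Int) : Int × Int :=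
  (PySem.List.enumerate masks 0).foldl
    (fun (p : Int × Int) (km : Int × Int) =>
      if PySem.Int.band (PySem.Int.bor (PySem.Int.band (km.2 >>> i.toNat) 1)
            (PySem.Int.band (km.2 >>> j.toNat) 1)) 1 ≠ 0
      then (p.1, PySem.Int.bor p.2 ((1 : Int) <<< km.1.toNat))
      else (PySem.Int.bor p.1 ((1 : Int) <<< km.1.toNat), p.2))
    (0, 0)

def build_or_partition_masks (masks : List Int) : List (Int × Int) :=
  (PySem.List.pyRange 0 10 1).foldl (fun out i =>
    (PySem.List.pyRange (i + 1) 10 1).foldl (fun out j =>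
      out ++ [pvInnerA masks i j]) out) []

-- ===== PORT B =====
-- `_col(masks, i)` of Source B
def pvColB (masks : List Int) (i : Nat) : Int :=
  (PySem.List.enumerate masks 0).foldl
    (fun (c : Int) (km : Int × Int) => PySem.Int.bor c ((PySem.Int.band (km.2 >>> i) 1) <<< km.1.toNat)) 0

def build_or_partition_masks_alt (masks : List Int) : List (Int × Int) :=
  let full : Int := ((1 : Int) <<< masks.length) - 1
  let cols : List Int := (List.range 10).map (fun i => pvColB masks i)
  (List.range 10).foldl (fun out i =>
    (List.range' (i + 1) (9 - i)).foldl (fun out j =>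
      let b1 := PySem.Int.bor (cols.getD i 0) (cols.getD j 0)
      out ++ [(PySem.Int.bxor full b1, b1)]) out) []

-- ===== PRECONDITION & SPEC =====
def Spec_build_or_partition_masks (masks : List Int) (out : List (Int × Int)) : Prop := out = build_or_partition_masks_alt masks
instance (masks : List Int) (out : List (Int × Int)) : Decidable (Spec_build_or_partition_masks masks out) := by unfold Spec_build_or_partition_masks; infer_instance

-- ===== CLAIM (what is proved, stated in full; the proofs are below) =====
def Claim_equal_build_or_partition_masks : Prop := ∀ (masks : List Int), Dom_build_or_partition_masks masks → Spec_build_or_partition_masks masks (build_or_partition_masks masks)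

-- ===== LEMMAS AND PROOFS =====

-- bit i of m, as Python computes it
def pvC (m : Int) (i : Nat) : Bool := PySem.Int.band (m >>> i) 1 == 1

-- Nat-level model: OR of 2^(k+position) over elements whose bit (as tested by c) is set
def pvOrBits (ms : List Int) (k : Nat) (c : Int → Bool) : Nat :=
  match ms with
  | [] => 0
  | m :: t => (if c m then 2 ^ k else 0) ||| pvOrBits t (k + 1) c

theorem pvBand01 (m : Int) (i : Nat) :
    PySem.Int.band (m >>> i) 1 = if pvC m i then 1 else 0 := by
  have h0 := PySem.Int.mod_nonneg (m >>> i) (b := 2) (by norm_num)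
  have h1 := PySem.Int.mod_lt (m >>> i) (b := 2) (by norm_num)
  unfold pvC
  rw [PySem.Int.band_one]
  interval_cases h : PySem.Int.mod (m >>> i) 2 <;> simp

theorem pvCondA (m : Int) (i j : Nat) :
    (PySem.Int.band (PySem.Int.bor (PySem.Int.band (m >>> i) 1)
        (PySem.Int.band (m >>> j) 1)) 1 ≠ 0) ↔ (pvC m i || pvC m j) = true := by
  rw [pvBand01 m i, pvBand01 m j]
  cases pvC m i <;> cases pvC m j <;> simp <;> decide

theorem pvOrBits_testBit (ms : List Int) (c : Int → Bool) :
    ∀ (k t : Nat), (pvOrBits ms k c).testBit t =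
      match ms[t - k]? with
      | some m => decide (k ≤ t) && c m
      | none => false := by
  induction ms with
  | nil => intro k t; simp [pvOrBits]
  | cons m tl ih =>
    intro k t
    simp only [pvOrBits, Nat.testBit_lor, ih (k + 1) t]
    rcases Nat.lt_trichotomy t k with h | h | h
    · have h2 : t - k = 0 := by omega
      have h4 : t - (k + 1) = 0 := by omega
      have e1 : ¬ k = t := by omega
      have e2 : ¬ k ≤ t := by omega
      have e3 : ¬ k + 1 ≤ t := by omega
      rw [h2, h4]
      cases tl[0]? <;> split <;> rename_i hc <;> simp [e1, e2, e3, hc]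
    · subst h
      have h2 : t - t = 0 := by omega
      have h4 : t - (t + 1) = 0 := by omega
      have e3 : ¬ t + 1 ≤ t := by omega
      rw [h2, h4]
      cases tl[0]? <;> split <;> rename_i hc <;> simp [e3, hc]
    · have h5 : t - k = (t - (k + 1)) + 1 := by omega
      have e1 : ¬ k = t := by omega
      have e2 : k ≤ t := by omega
      have e3 : k + 1 ≤ t := by omega
      rw [h5]
      simp only [List.getElem?_cons_succ]
      cases htl : tl[t - (k + 1)]? <;> split <;> rename_i hc <;> simp [e1, e2, e3]
theorem pvOrBits_or (ms : List Int) (c1 c2 : Int → Bool) (k : Nat) :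
    pvOrBits ms k (fun m => c1 m || c2 m) = pvOrBits ms k c1 ||| pvOrBits ms k c2 := by
  apply Nat.eq_of_testBit_eq
  intro t
  rw [Nat.testBit_lor, pvOrBits_testBit, pvOrBits_testBit, pvOrBits_testBit]
  cases ms[t - k]? <;> simp [Bool.and_or_distrib_left]
theorem pvOrBits_not (ms : List Int) (c : Int → Bool) :
    (2 ^ ms.length - 1) ^^^ pvOrBits ms 0 c = pvOrBits ms 0 (fun m => !c m) := by
  apply Nat.eq_of_testBit_eq
  intro t
  rw [Nat.testBit_xor, Nat.testBit_two_pow_sub_one, pvOrBits_testBit, pvOrBits_testBit]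
  cases h : ms[t]? with
  | none =>
    have : ms.length ≤ t := by
      simpa using List.getElem?_eq_none_iff.mp (by simpa using h)
    simp
    omega
  | some m =>
    have : t < ms.length := by
      exact List.getElem?_eq_some_iff.mp (by simpa using h) |>.1
    simp [this]
theorem pvG2 (ms : List Int) (i : Nat) :
    ∀ (k a : Nat),
      (PySem.List.enumerate ms (k : Int)).foldl
        (fun (c : Int) (km : Int × Int) => PySem.Int.bor c ((PySem.Int.band (km.2 >>> i) 1) <<< km.1.toNat)) (a : Int)
      = ((a ||| pvOrBits ms k (fun m => pvC m i) : Nat) : Int) := by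
  induction ms with
  | nil => intro k a; simp [PySem.List.enumerate_nil, pvOrBits]
  | cons m tl ih =>
    intro k a
    rw [PySem.List.enumerate_cons, List.foldl_cons]
    have hcast : ((k : Int) + 1) = ((k + 1 : Nat) : Int) := by push_cast; ring
    cases hc : pvC m i with
    | true =>
      have hstep : PySem.Int.bor (a : Int) ((PySem.Int.band (m >>> i) 1) <<< ((k : Int)).toNat)
          = ((a ||| 2 ^ k : Nat) : Int) := by
        rw [pvBand01, hc, if_pos rfl]
        simp [Int.shiftLeft_eq, ← PySem.Int.bor_natCast]
      simp only [hstep, hcast, ih (k + 1) (a ||| 2 ^ k)]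
      rw [pvOrBits]
      simp [hc, Nat.lor_assoc]
    | false =>
      have hstep : PySem.Int.bor (a : Int) ((PySem.Int.band (m >>> i) 1) <<< ((k : Int)).toNat)
          = ((a : Nat) : Int) := by
        rw [pvBand01, hc, if_neg (by simp)]
        simp
      simp only [hstep, hcast, ih (k + 1) a]
      rw [pvOrBits]
      simp [hc]
theorem pvColB_eq (ms : List Int) (i : Nat) :
    pvColB ms i = ((pvOrBits ms 0 (fun m => pvC m i) : Nat) : Int) := by
  have := pvG2 ms i 0 0
  simpa [pvColB] using this

theorem pvG1 (ms : List Int) (i j : Nat) :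
    ∀ (k b0 b1 : Nat),
      (PySem.List.enumerate ms (k : Int)).foldl
        (fun (p : Int × Int) (km : Int × Int) =>
          if PySem.Int.band (PySem.Int.bor (PySem.Int.band (km.2 >>> ((i : Int)).toNat) 1)
                (PySem.Int.band (km.2 >>> ((j : Int)).toNat) 1)) 1 ≠ 0
          then (p.1, PySem.Int.bor p.2 ((1 : Int) <<< km.1.toNat))
          else (PySem.Int.bor p.1 ((1 : Int) <<< km.1.toNat), p.2))
        ((b0 : Int), (b1 : Int))
      = (((b0 ||| pvOrBits ms k (fun m => !(pvC m i || pvC m j)) : Nat) : Int),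
         ((b1 ||| pvOrBits ms k (fun m => pvC m i || pvC m j) : Nat) : Int)) := by
  induction ms with
  | nil => intro k b0 b1; simp [PySem.List.enumerate_nil, pvOrBits]
  | cons m tl ih =>
    intro k b0 b1
    rw [PySem.List.enumerate_cons, List.foldl_cons]
    have hcast : ((k : Int) + 1) = ((k + 1 : Nat) : Int) := by push_cast; ring
    have hsh : ((1 : Int) <<< ((k : Int)).toNat) = ((2 ^ k : Nat) : Int) := by
      simp [Int.shiftLeft_eq]
    have htn : ((i : Int)).toNat = i := Int.toNat_natCast i
    have htnj : ((j : Int)).toNat = j := Int.toNat_natCast j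
    cases hc : (pvC m i || pvC m j) with
    | true =>
      rw [if_pos (by rw [htn, htnj]; exact (pvCondA m i j).mpr hc)]
      have hstep : PySem.Int.bor (b1 : Int) ((1 : Int) <<< ((k : Int)).toNat)
          = ((b1 ||| 2 ^ k : Nat) : Int) := by
        rw [hsh, ← PySem.Int.bor_natCast]
      simp only [hstep, hcast, ih (k + 1) b0 (b1 ||| 2 ^ k)]
      rw [pvOrBits, pvOrBits]
      simp [hc, Nat.lor_assoc]
    | false =>
      rw [if_neg (by rw [htn, htnj]; simp [(pvCondA m i j), hc])]
      have hstep : PySem.Int.bor (b0 : Int) ((1 : Int) <<< ((k : Int)).toNat)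
          = ((b0 ||| 2 ^ k : Nat) : Int) := by
        rw [hsh, ← PySem.Int.bor_natCast]
      simp only [hstep, hcast, ih (k + 1) (b0 ||| 2 ^ k) b1]
      rw [pvOrBits, pvOrBits]
      simp [hc, Nat.lor_assoc]
theorem pvL (ms : List Int) (i j : Nat) :
    pvInnerA ms (i : Int) (j : Int) =
      (PySem.Int.bxor (((1 : Int) <<< ms.length) - 1)
         (PySem.Int.bor (pvColB ms i) (pvColB ms j)),
       PySem.Int.bor (pvColB ms i) (pvColB ms j)) := by
  have h1 := pvG1 ms i j 0 0 0
  simp only [Nat.cast_zero, Nat.zero_or] at h1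
  have hfull : ((1 : Int) <<< ms.length) - 1 = ((2 ^ ms.length - 1 : Nat) : Int) := by
    rw [Nat.cast_sub Nat.one_le_two_pow]
    simp [Int.shiftLeft_eq]
  rw [pvInnerA, h1, hfull, pvColB_eq, pvColB_eq, PySem.Int.bor_natCast]
  simp only [← pvOrBits_or, PySem.Int.bxor_natCast, pvOrBits_not]

-- ===== VERDICT (by name: the statement is the Claim_ definition above) =====
theorem build_or_partition_masks_spec : Claim_equal_build_or_partition_masks := by
  intro masks _hdom
  unfold Spec_build_or_partition_masks
  have hr : PySem.List.pyRange 0 10 1 = [0,1,2,3,4,5,6,7,8,9] := by decide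
  have g0 : List.range 10 = [0,1,2,3,4,5,6,7,8,9] := by decide
  have e0 : PySem.List.pyRange (0+1) 10 1 = [1,2,3,4,5,6,7,8,9] := by decide
  have f0 : List.range' (0+1) (9-0) = [1,2,3,4,5,6,7,8,9] := by decide
  have e1 : PySem.List.pyRange (1+1) 10 1 = [2,3,4,5,6,7,8,9] := by decide
  have f1 : List.range' (1+1) (9-1) = [2,3,4,5,6,7,8,9] := by decide
  have e2 : PySem.List.pyRange (2+1) 10 1 = [3,4,5,6,7,8,9] := by decide
  have f2 : List.range' (2+1) (9-2) = [3,4,5,6,7,8,9] := by decide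
  have e3 : PySem.List.pyRange (3+1) 10 1 = [4,5,6,7,8,9] := by decide
  have f3 : List.range' (3+1) (9-3) = [4,5,6,7,8,9] := by decide
  have e4 : PySem.List.pyRange (4+1) 10 1 = [5,6,7,8,9] := by decide
  have f4 : List.range' (4+1) (9-4) = [5,6,7,8,9] := by decide
  have e5 : PySem.List.pyRange (5+1) 10 1 = [6,7,8,9] := by decide
  have f5 : List.range' (5+1) (9-5) = [6,7,8,9] := by decide
  have e6 : PySem.List.pyRange (6+1) 10 1 = [7,8,9] := by decide
  have f6 : List.range' (6+1) (9-6) = [7,8,9] := by decide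
  have e7 : PySem.List.pyRange (7+1) 10 1 = [8,9] := by decide
  have f7 : List.range' (7+1) (9-7) = [8,9] := by decide
  have e8 : PySem.List.pyRange (8+1) 10 1 = [9] := by decide
  have f8 : List.range' (8+1) (9-8) = [9] := by decide
  have e9 : PySem.List.pyRange (9+1) 10 1 = [] := by decide
  have f9 : List.range' (9+1) (9-9) = [] := by decide
  have L01 : pvInnerA masks 0 1 = (PySem.Int.bxor (((1 : Int) <<< masks.length) - 1) (PySem.Int.bor (pvColB masks 0) (pvColB masks 1)), PySem.Int.bor (pvColB masks 0) (pvColB masks 1)) := pvL masks 0 1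
  have L02 : pvInnerA masks 0 2 = (PySem.Int.bxor (((1 : Int) <<< masks.length) - 1) (PySem.Int.bor (pvColB masks 0) (pvColB masks 2)), PySem.Int.bor (pvColB masks 0) (pvColB masks 2)) := pvL masks 0 2
  have L03 : pvInnerA masks 0 3 = (PySem.Int.bxor (((1 : Int) <<< masks.length) - 1) (PySem.Int.bor (pvColB masks 0) (pvColB masks 3)), PySem.Int.bor (pvColB masks 0) (pvColB masks 3)) := pvL masks 0 3
  have L04 : pvInnerA masks 0 4 = (PySem.Int.bxor (((1 : Int) <<< masks.length) - 1) (PySem.Int.bor (pvColB masks 0) (pvColB masks 4)), PySem.Int.bor (pvColB masks 0) (pvColB masks 4)) := pvL masks 0 4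
  have L05 : pvInnerA masks 0 5 = (PySem.Int.bxor (((1 : Int) <<< masks.length) - 1) (PySem.Int.bor (pvColB masks 0) (pvColB masks 5)), PySem.Int.bor (pvColB masks 0) (pvColB masks 5)) := pvL masks 0 5
  have L06 : pvInnerA masks 0 6 = (PySem.Int.bxor (((1 : Int) <<< masks.length) - 1) (PySem.Int.bor (pvColB masks 0) (pvColB masks 6)), PySem.Int.bor (pvColB masks 0) (pvColB masks 6)) := pvL masks 0 6
  have L07 : pvInnerA masks 0 7 = (PySem.Int.bxor (((1 : Int) <<< masks.length) - 1) (PySem.Int.bor (pvColB masks 0) (pvColB masks 7)), PySem.Int.bor (pvColB masks 0) (pvColB masks 7)) := pvL masks 0 7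
  have L08 : pvInnerA masks 0 8 = (PySem.Int.bxor (((1 : Int) <<< masks.length) - 1) (PySem.Int.bor (pvColB masks 0) (pvColB masks 8)), PySem.Int.bor (pvColB masks 0) (pvColB masks 8)) := pvL masks 0 8
  have L09 : pvInnerA masks 0 9 = (PySem.Int.bxor (((1 : Int) <<< masks.length) - 1) (PySem.Int.bor (pvColB masks 0) (pvColB masks 9)), PySem.Int.bor (pvColB masks 0) (pvColB masks 9)) := pvL masks 0 9
  have L12 : pvInnerA masks 1 2 = (PySem.Int.bxor (((1 : Int) <<< masks.length) - 1) (PySem.Int.bor (pvColB masks 1) (pvColB masks 2)), PySem.Int.bor (pvColB masks 1) (pvColB masks 2)) := pvL masks 1 2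
  have L13 : pvInnerA masks 1 3 = (PySem.Int.bxor (((1 : Int) <<< masks.length) - 1) (PySem.Int.bor (pvColB masks 1) (pvColB masks 3)), PySem.Int.bor (pvColB masks 1) (pvColB masks 3)) := pvL masks 1 3
  have L14 : pvInnerA masks 1 4 = (PySem.Int.bxor (((1 : Int) <<< masks.length) - 1) (PySem.Int.bor (pvColB masks 1) (pvColB masks 4)), PySem.Int.bor (pvColB masks 1) (pvColB masks 4)) := pvL masks 1 4
  have L15 : pvInnerA masks 1 5 = (PySem.Int.bxor (((1 : Int) <<< masks.length) - 1) (PySem.Int.bor (pvColB masks 1) (pvColB masks 5)), PySem.Int.bor (pvColB masks 1) (pvColB masks 5)) := pvL masks 1 5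
  have L16 : pvInnerA masks 1 6 = (PySem.Int.bxor (((1 : Int) <<< masks.length) - 1) (PySem.Int.bor (pvColB masks 1) (pvColB masks 6)), PySem.Int.bor (pvColB masks 1) (pvColB masks 6)) := pvL masks 1 6
  have L17 : pvInnerA masks 1 7 = (PySem.Int.bxor (((1 : Int) <<< masks.length) - 1) (PySem.Int.bor (pvColB masks 1) (pvColB masks 7)), PySem.Int.bor (pvColB masks 1) (pvColB masks 7)) := pvL masks 1 7
  have L18 : pvInnerA masks 1 8 = (PySem.Int.bxor (((1 : Int) <<< masks.length) - 1) (PySem.Int.bor (pvColB masks 1) (pvColB masks 8)), PySem.Int.bor (pvColB masks 1) (pvColB masks 8)) := pvL masks 1 8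
  have L19 : pvInnerA masks 1 9 = (PySem.Int.bxor (((1 : Int) <<< masks.length) - 1) (PySem.Int.bor (pvColB masks 1) (pvColB masks 9)), PySem.Int.bor (pvColB masks 1) (pvColB masks 9)) := pvL masks 1 9
  have L23 : pvInnerA masks 2 3 = (PySem.Int.bxor (((1 : Int) <<< masks.length) - 1) (PySem.Int.bor (pvColB masks 2) (pvColB masks 3)), PySem.Int.bor (pvColB masks 2) (pvColB masks 3)) := pvL masks 2 3
  have L24 : pvInnerA masks 2 4 = (PySem.Int.bxor (((1 : Int) <<< masks.length) - 1) (PySem.Int.bor (pvColB masks 2) (pvColB masks 4)), PySem.Int.bor (pvColB masks 2) (pvColB masks 4)) := pvL masks 2 4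
  have L25 : pvInnerA masks 2 5 = (PySem.Int.bxor (((1 : Int) <<< masks.length) - 1) (PySem.Int.bor (pvColB masks 2) (pvColB masks 5)), PySem.Int.bor (pvColB masks 2) (pvColB masks 5)) := pvL masks 2 5
  have L26 : pvInnerA masks 2 6 = (PySem.Int.bxor (((1 : Int) <<< masks.length) - 1) (PySem.Int.bor (pvColB masks 2) (pvColB masks 6)), PySem.Int.bor (pvColB masks 2) (pvColB masks 6)) := pvL masks 2 6
  have L27 : pvInnerA masks 2 7 = (PySem.Int.bxor (((1 : Int) <<< masks.length) - 1) (PySem.Int.bor (pvColB masks 2) (pvColB masks 7)), PySem.Int.bor (pvColB masks 2) (pvColB masks 7)) := pvL masks 2 7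
  have L28 : pvInnerA masks 2 8 = (PySem.Int.bxor (((1 : Int) <<< masks.length) - 1) (PySem.Int.bor (pvColB masks 2) (pvColB masks 8)), PySem.Int.bor (pvColB masks 2) (pvColB masks 8)) := pvL masks 2 8
  have L29 : pvInnerA masks 2 9 = (PySem.Int.bxor (((1 : Int) <<< masks.length) - 1) (PySem.Int.bor (pvColB masks 2) (pvColB masks 9)), PySem.Int.bor (pvColB masks 2) (pvColB masks 9)) := pvL masks 2 9
  have L34 : pvInnerA masks 3 4 = (PySem.Int.bxor (((1 : Int) <<< masks.length) - 1) (PySem.Int.bor (pvColB masks 3) (pvColB masks 4)), PySem.Int.bor (pvColB masks 3) (pvColB masks 4)) := pvL masks 3 4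
  have L35 : pvInnerA masks 3 5 = (PySem.Int.bxor (((1 : Int) <<< masks.length) - 1) (PySem.Int.bor (pvColB masks 3) (pvColB masks 5)), PySem.Int.bor (pvColB masks 3) (pvColB masks 5)) := pvL masks 3 5
  have L36 : pvInnerA masks 3 6 = (PySem.Int.bxor (((1 : Int) <<< masks.length) - 1) (PySem.Int.bor (pvColB masks 3) (pvColB masks 6)), PySem.Int.bor (pvColB masks 3) (pvColB masks 6)) := pvL masks 3 6
  have L37 : pvInnerA masks 3 7 = (PySem.Int.bxor (((1 : Int) <<< masks.length) - 1) (PySem.Int.bor (pvColB masks 3) (pvColB masks 7)), PySem.Int.bor (pvColB masks 3) (pvColB masks 7)) := pvL masks 3 7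
  have L38 : pvInnerA masks 3 8 = (PySem.Int.bxor (((1 : Int) <<< masks.length) - 1) (PySem.Int.bor (pvColB masks 3) (pvColB masks 8)), PySem.Int.bor (pvColB masks 3) (pvColB masks 8)) := pvL masks 3 8
  have L39 : pvInnerA masks 3 9 = (PySem.Int.bxor (((1 : Int) <<< masks.length) - 1) (PySem.Int.bor (pvColB masks 3) (pvColB masks 9)), PySem.Int.bor (pvColB masks 3) (pvColB masks 9)) := pvL masks 3 9
  have L45 : pvInnerA masks 4 5 = (PySem.Int.bxor (((1 : Int) <<< masks.length) - 1) (PySem.Int.bor (pvColB masks 4) (pvColB masks 5)), PySem.Int.bor (pvColB masks 4) (pvColB masks 5)) := pvL masks 4 5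
  have L46 : pvInnerA masks 4 6 = (PySem.Int.bxor (((1 : Int) <<< masks.length) - 1) (PySem.Int.bor (pvColB masks 4) (pvColB masks 6)), PySem.Int.bor (pvColB masks 4) (pvColB masks 6)) := pvL masks 4 6
  have L47 : pvInnerA masks 4 7 = (PySem.Int.bxor (((1 : Int) <<< masks.length) - 1) (PySem.Int.bor (pvColB masks 4) (pvColB masks 7)), PySem.Int.bor (pvColB masks 4) (pvColB masks 7)) := pvL masks 4 7
  have L48 : pvInnerA masks 4 8 = (PySem.Int.bxor (((1 : Int) <<< masks.length) - 1) (PySem.Int.bor (pvColB masks 4) (pvColB masks 8)), PySem.Int.bor (pvColB masks 4) (pvColB masks 8)) := pvL masks 4 8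
  have L49 : pvInnerA masks 4 9 = (PySem.Int.bxor (((1 : Int) <<< masks.length) - 1) (PySem.Int.bor (pvColB masks 4) (pvColB masks 9)), PySem.Int.bor (pvColB masks 4) (pvColB masks 9)) := pvL masks 4 9
  have L56 : pvInnerA masks 5 6 = (PySem.Int.bxor (((1 : Int) <<< masks.length) - 1) (PySem.Int.bor (pvColB masks 5) (pvColB masks 6)), PySem.Int.bor (pvColB masks 5) (pvColB masks 6)) := pvL masks 5 6
  have L57 : pvInnerA masks 5 7 = (PySem.Int.bxor (((1 : Int) <<< masks.length) - 1) (PySem.Int.bor (pvColB masks 5) (pvColB masks 7)), PySem.Int.bor (pvColB masks 5) (pvColB masks 7)) := pvL masks 5 7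
  have L58 : pvInnerA masks 5 8 = (PySem.Int.bxor (((1 : Int) <<< masks.length) - 1) (PySem.Int.bor (pvColB masks 5) (pvColB masks 8)), PySem.Int.bor (pvColB masks 5) (pvColB masks 8)) := pvL masks 5 8
  have L59 : pvInnerA masks 5 9 = (PySem.Int.bxor (((1 : Int) <<< masks.length) - 1) (PySem.Int.bor (pvColB masks 5) (pvColB masks 9)), PySem.Int.bor (pvColB masks 5) (pvColB masks 9)) := pvL masks 5 9
  have L67 : pvInnerA masks 6 7 = (PySem.Int.bxor (((1 : Int) <<< masks.length) - 1) (PySem.Int.bor (pvColB masks 6) (pvColB masks 7)), PySem.Int.bor (pvColB masks 6) (pvColB masks 7)) := pvL masks 6 7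
  have L68 : pvInnerA masks 6 8 = (PySem.Int.bxor (((1 : Int) <<< masks.length) - 1) (PySem.Int.bor (pvColB masks 6) (pvColB masks 8)), PySem.Int.bor (pvColB masks 6) (pvColB masks 8)) := pvL masks 6 8
  have L69 : pvInnerA masks 6 9 = (PySem.Int.bxor (((1 : Int) <<< masks.length) - 1) (PySem.Int.bor (pvColB masks 6) (pvColB masks 9)), PySem.Int.bor (pvColB masks 6) (pvColB masks 9)) := pvL masks 6 9
  have L78 : pvInnerA masks 7 8 = (PySem.Int.bxor (((1 : Int) <<< masks.length) - 1) (PySem.Int.bor (pvColB masks 7) (pvColB masks 8)), PySem.Int.bor (pvColB masks 7) (pvColB masks 8)) := pvL masks 7 8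
  have L79 : pvInnerA masks 7 9 = (PySem.Int.bxor (((1 : Int) <<< masks.length) - 1) (PySem.Int.bor (pvColB masks 7) (pvColB masks 9)), PySem.Int.bor (pvColB masks 7) (pvColB masks 9)) := pvL masks 7 9
  have L89 : pvInnerA masks 8 9 = (PySem.Int.bxor (((1 : Int) <<< masks.length) - 1) (PySem.Int.bor (pvColB masks 8) (pvColB masks 9)), PySem.Int.bor (pvColB masks 8) (pvColB masks 9)) := pvL masks 8 9
  simp only [build_or_partition_masks, build_or_partition_masks_alt, hr, g0, e0, f0, e1, f1, e2, f2, e3, f3, e4, f4, e5, f5, e6, f6, e7, f7, e8, f8, e9, f9,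
    List.foldl_cons, List.foldl_nil, List.map_cons, List.map_nil, L01, L02, L03, L04, L05, L06, L07, L08, L09, L12, L13, L14, L15, L16, L17, L18, L19, L23, L24, L25, L26, L27, L28, L29, L34, L35, L36, L37, L38, L39, L45, L46, L47, L48, L49, L56, L57, L58, L59, L67, L68, L69, L78, L79, L89]
  simp
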